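-- pv_equiv track=rewrite | github.com/RayyanNafees/pixel-cipher | src/tenX.py | pixelize
-- ===== SOURCE A (Python) =====
-- PIXEL_CONST = 1677721600
--
-- def pixelize(n: int) -> list[tuple[int, int, int, int]]:
--
--     def pixel(n: int) -> tuple[int, int, int, int]:
--         """Converts an integer to a pixel representation"""
--         assert n < PIXEL_CONST, f"Number should be less than {PIXEL_CONST}"
--
--         a = n
--         b = a // 100
--         g = b // 256
--         r = g // 256
--
--         return (r % 256, g % 256, b % 256, a % 100)
--
--     def one_in_start(n: int) -> int:
--         """makes a 9 digit number or less 10 digit number by adding 1 in starting"""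
--         """Example:
--                 567 becomes 1000000567 (a 10 digit number)"""
--         return 1 * pow(10, 9) + n if n < pow(10, 8) else n
--
--     def ten_digit_list(n: int) -> list[int]:
--         limit = pow(10, 9)
--
--         return [one_in_start(n % limit)] + ten_digit_list(n // limit) if n > limit else [n]
--
--
--     return [pixel(i) for i in ten_digit_list(n)]
-- ===== SOURCE B (Python) =====
-- PIXEL_CONST = 1677721600
--
-- def pixelize(n: int) -> list[tuple[int, int, int, int]]:
--     limit = 10 ** 9
--     chunks = []
--     while n > limit:
--         c = n % limit
--         chunks.append(10 ** 9 + c if c < 10 ** 8 else c)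
--         n //= limit
--     chunks.append(n)
--     return [((c // 100 // 256 // 256) % 256, (c // 100 // 256) % 256,
--              (c // 100) % 256, c % 100) for c in chunks]
-- ===== Notes on version B (the rewrite author's own statement) =====
-- stated objective: simpler
-- what changed: Replaces the recursive ten_digit_list (building the chunk list by list concatenation on return) with a single iterative while-loop that appends chunks to an accumulator, inlining one_in_start and pixel.
import Mathlib
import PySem

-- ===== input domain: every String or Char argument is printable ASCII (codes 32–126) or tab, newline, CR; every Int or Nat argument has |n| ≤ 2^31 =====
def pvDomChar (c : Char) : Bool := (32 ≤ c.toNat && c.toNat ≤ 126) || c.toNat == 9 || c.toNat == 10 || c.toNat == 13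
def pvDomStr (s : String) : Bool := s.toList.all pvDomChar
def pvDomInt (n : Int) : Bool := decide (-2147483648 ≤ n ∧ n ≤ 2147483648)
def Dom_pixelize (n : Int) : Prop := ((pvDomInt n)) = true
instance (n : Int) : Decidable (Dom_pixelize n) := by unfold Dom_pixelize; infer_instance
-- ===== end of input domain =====

-- ===== PORT A =====
-- B replaces the recursive chunking with an iterative accumulator loop; same return value.
-- helper: Python's `pixel` (the assert never fires on chunks reachable inside Dom)
def pvA_pixel (n : Int) : Int × Int × Int × Int :=
  let a := n
  let b := PySem.Int.floordiv a 100
  let g := PySem.Int.floordiv b 256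
  let r := PySem.Int.floordiv g 256
  (PySem.Int.mod r 256, PySem.Int.mod g 256, PySem.Int.mod b 256, PySem.Int.mod a 100)

-- helper: Python's `one_in_start`
def pvA_oneInStart (n : Int) : Int :=
  if n < 100000000 then 1 * 1000000000 + n else n

-- helper: Python's recursive `ten_digit_list`
def pvA_tenDigitList (n : Int) : List Int :=
  if n > 1000000000 then
    [pvA_oneInStart (PySem.Int.mod n 1000000000)] ++ pvA_tenDigitList (PySem.Int.floordiv n 1000000000)
  else [n]
termination_by n.toNat
decreasing_by
  rename_i h
  rw [PySem.Int.floordiv_eq_ediv_of_pos (by omega)]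
  omega

def pixelize (n : Int) : List (Int × Int × Int × Int) :=
  (pvA_tenDigitList n).map pvA_pixel

-- ===== PORT B =====
-- B's while-loop over (n, chunks), appending each encoded chunk to the accumulator
def pvB_loop (n : Int) (chunks : List Int) : List Int :=
  if n > 1000000000 then
    let c := PySem.Int.mod n 1000000000
    pvB_loop (PySem.Int.floordiv n 1000000000)
      (chunks ++ [if c < 100000000 then 1000000000 + c else c])
  else chunks ++ [n]
termination_by n.toNat
decreasing_by
  rename_i h
  rw [PySem.Int.floordiv_eq_ediv_of_pos (by omega)]
  omega

def pixelize_alt (n : Int) : List (Int × Int × Int × Int) :=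
  (pvB_loop n []).map (fun c =>
    (PySem.Int.mod (PySem.Int.floordiv (PySem.Int.floordiv (PySem.Int.floordiv c 100) 256) 256) 256,
     PySem.Int.mod (PySem.Int.floordiv (PySem.Int.floordiv c 100) 256) 256,
     PySem.Int.mod (PySem.Int.floordiv c 100) 256,
     PySem.Int.mod c 100))
-- ===== PRECONDITION & SPEC =====
def Spec_pixelize (n : Int) (out : List (Int × Int × Int × Int)) : Prop := out = pixelize_alt n
instance (n : Int) (out : List (Int × Int × Int × Int)) : Decidable (Spec_pixelize n out) := by unfold Spec_pixelize; infer_instance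

-- ===== CLAIM (what is proved, stated in full; the proofs are below) =====
def Claim_equal_pixelize : Prop := ∀ (n : Int), Dom_pixelize n → Spec_pixelize n (pixelize n)

-- ===== LEMMAS AND PROOFS =====

-- ===== VERDICT (by name: the statement is the Claim_ definition above) =====
lemma pvB_loop_eq (n : Int) (acc : List Int) :
    pvB_loop n acc = acc ++ pvA_tenDigitList n := by
  fun_induction pvB_loop n acc with
  | case1 n acc h c ih =>
      simp only [dite_eq_ite] at ih
      rw [ih]
      conv_rhs => rw [pvA_tenDigitList, if_pos h]
      simp [pvA_oneInStart, c]
  | case2 n acc h =>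
      rw [pvA_tenDigitList, if_neg h]

theorem pixelize_spec : Claim_equal_pixelize := by
  intro n _
  unfold Spec_pixelize pixelize pixelize_alt
  rw [pvB_loop_eq]
  simp [pvA_pixel]
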